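-- pv_equiv track=rewrite | github.com/EducationAccountCreatedAt06092024/EducationalRepository | tasks/task_09.py | connect_dicts
-- ===== SOURCE A (Python) =====
-- from typing import Any
--
-- def connect_dicts(a: dict[Any, int], b: dict[Any, int]) -> dict[Any, int]:
--     a_value, b_value = sum(a.values()), sum(b.values())
--
--     if a_value > b_value:
--         main, secondary = a, b
--     else:
--         main, secondary = b, a
--
--     connected: list[tuple[Any, int]] = []
--
--     keys = set()
--     keys.update(main.keys())
--     keys.update(secondary.keys())
--     for key in keys:
--         value = main.get(key, secondary.get(key))
--         connected.append((key, value))  # type: ignore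
--
--     return dict(sorted(filter(lambda x: x[1] > 10, connected), key=lambda x: x[1]))
-- ===== SOURCE B (Python) =====
-- def connect_dicts(a, b):
--     main, secondary = (a, b) if sum(a.values()) > sum(b.values()) else (b, a)
--     cands = [(k, v, 0) for k, v in main.items()] + [(k, v, 1) for k, v in secondary.items()]
--     cands.sort(key=lambda t: t[1])
--     result = {}
--     for k, v, tag in cands:
--         if v > 10 and (tag == 0 or k not in main):
--             result[k] = v
--     return result
-- ===== Notes on version B (the rewrite author's own statement) =====
-- stated objective: alternative
-- what changed: Instead of A's key-set union, per-key get-with-fallback merge and final filter-then-sort, B sorts the raw tagged items of both dicts by value first and then builds the result in one linear scan that filters (>10) and resolves duplicate keys by origin tag; return value is compared as a dict, where A's set-iteration tie order is immaterial.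
import Mathlib
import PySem

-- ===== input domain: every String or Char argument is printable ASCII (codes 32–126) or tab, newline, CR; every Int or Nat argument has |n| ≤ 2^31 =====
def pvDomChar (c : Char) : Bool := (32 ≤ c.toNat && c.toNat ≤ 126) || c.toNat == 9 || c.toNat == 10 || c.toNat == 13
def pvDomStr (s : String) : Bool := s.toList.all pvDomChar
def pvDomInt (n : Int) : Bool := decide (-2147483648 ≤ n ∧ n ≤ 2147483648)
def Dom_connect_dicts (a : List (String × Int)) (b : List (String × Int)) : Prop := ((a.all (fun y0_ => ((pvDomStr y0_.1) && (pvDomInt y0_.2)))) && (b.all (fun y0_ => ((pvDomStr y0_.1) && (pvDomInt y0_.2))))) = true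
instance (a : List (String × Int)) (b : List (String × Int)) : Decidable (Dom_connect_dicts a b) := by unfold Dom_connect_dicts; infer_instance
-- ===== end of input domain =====

-- B replaces A's key-set union + get-fallback merge + filter-then-sort by a sort-first pipeline:
-- sort the raw tagged items of both dicts by value, then one linear scan filters (>10) and
-- resolves duplicate keys by origin tag (alternative decomposition; same asymptotic cost).
-- Python A iterates a hash-ordered set before its stable sort, so A's tie order among equal
-- values is arbitrary; outputs are dicts (compared as finite maps), so the returned value is
-- unaffected.  The ports use deterministic insertion order (main items first).

-- ===== PORT A =====
-- 'main.get(key, secondary.get(key))': the key always lies in main or secondary, so the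
-- extra .getD 0 (Python's would-be None) is unreachable; exact on every admitted input.
def connect_dicts (a : List (String × Int)) (b : List (String × Int)) : List (String × Int) :=
  let da := PySem.Dict.ofList a
  let db := PySem.Dict.ofList b
  let a_value := da.values.sum
  let b_value := db.values.sum
  let ms := if a_value > b_value then (da, db) else (db, da)
  let main := ms.1
  let secondary := ms.2
  let keys : PySem.Set String := PySem.Set.empty
  let keys := PySem.Set.update keys (PySem.Dict.keys main)
  let keys := PySem.Set.update keys (PySem.Dict.keys secondary)
  let connected := keys.foldl (fun acc key =>
      acc ++ [(key, match PySem.Dict.get? main key with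
                    | some v => v
                    | none => (PySem.Dict.get? secondary key).getD 0)]) ([] : List (String × Int))
  (PySem.Dict.ofList (PySem.List.sorted (connected.filter (fun x => decide (x.2 > 10))) (fun x => x.2) false)).items

-- ===== PORT B =====
def connect_dicts_alt (a : List (String × Int)) (b : List (String × Int)) : List (String × Int) :=
  let da := PySem.Dict.ofList a
  let db := PySem.Dict.ofList b
  let ms := if da.values.sum > db.values.sum then (da, db) else (db, da)
  let main := ms.1
  let secondary := ms.2
  let cands := main.items.map (fun p => (p.1, p.2, (0 : Int)))
      ++ secondary.items.map (fun p => (p.1, p.2, (1 : Int)))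
  let cands := PySem.List.sorted cands (fun t => t.2.1) false
  let result := cands.foldl (fun d t =>
      if t.2.1 > 10 ∧ (t.2.2 = 0 ∨ main.contains t.1 = false) then d.insert t.1 t.2.1 else d)
    (PySem.Dict.empty : PySem.Dict String Int)
  result.items

-- ===== PRECONDITION & SPEC =====
def Spec_connect_dicts (a : List (String × Int)) (b : List (String × Int)) (out : List (String × Int)) : Prop := out = connect_dicts_alt a b
instance (a : List (String × Int)) (b : List (String × Int)) (out : List (String × Int)) : Decidable (Spec_connect_dicts a b out) := by unfold Spec_connect_dicts; infer_instance

-- ===== CLAIM (what is proved, stated in full; the proofs are below) =====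
def Claim_equal_connect_dicts : Prop := ∀ (a : List (String × Int)) (b : List (String × Int)), Dom_connect_dicts a b → Spec_connect_dicts a b (connect_dicts a b)

-- ===== LEMMAS AND PROOFS =====

-- insertion-sort step: definitional case equations
lemma insertBy_nil {α : Type} (bef : α → α → Bool) (x : α) :
    PySem.List.insertBy bef x [] = [x] := rfl

lemma insertBy_cons {α : Type} (bef : α → α → Bool) (x y : α) (ys : List α) :
    PySem.List.insertBy bef x (y :: ys) =
      if bef x y then x :: y :: ys else y :: PySem.List.insertBy bef x ys := rfl

-- if x goes before everything, insertBy prepends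
lemma insertBy_all_before {α : Type} (key : α → Int) (x : α) (ys : List α)
    (h : ∀ z ∈ ys, key x < key z) :
    PySem.List.insertBy (fun a b => decide (key a < key b)) x ys = x :: ys := by
  cases ys with
  | nil => rfl
  | cons y ys =>
    rw [insertBy_cons, if_pos]
    exact decide_eq_true (h y (List.mem_cons_self))

-- map commutes with insertBy when the keys correspond through the map
lemma map_insertBy {α β : Type} (f : α → β) (keyb : α → Int) (keya : β → Int)
    (hk : ∀ t, keya (f t) = keyb t) (x : α) (ys : List α) :
    (PySem.List.insertBy (fun a b => decide (keyb a < keyb b)) x ys).map f =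
      PySem.List.insertBy (fun a b => decide (keya a < keya b)) (f x) (ys.map f) := by
  induction ys with
  | nil => rfl
  | cons y ys ih =>
    rw [insertBy_cons, List.map_cons, insertBy_cons]
    rw [hk x, hk y]
    by_cases hb : keyb x < keyb y
    · simp [hb]
    · simp [hb, ih]

-- insertBy preserves sortedness
lemma pairwise_insertBy {α : Type} (key : α → Int) (x : α) (ys : List α)
    (h : ys.Pairwise (fun a b => key a ≤ key b)) :
    (PySem.List.insertBy (fun a b => decide (key a < key b)) x ys).Pairwise
      (fun a b => key a ≤ key b) := by
  induction ys with
  | nil => simp [insertBy_nil]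
  | cons y ys ih =>
    rw [insertBy_cons]
    rcases List.pairwise_cons.mp h with ⟨hy, hys⟩
    by_cases hb : key x < key y
    · rw [if_pos (decide_eq_true hb)]
      refine List.pairwise_cons.mpr ⟨?_, h⟩
      intro z hz
      rcases List.mem_cons.mp hz with rfl | hz
      · exact le_of_lt hb
      · exact le_of_lt (lt_of_lt_of_le hb (hy z hz))
    · rw [if_neg (by simp [hb])]
      refine List.pairwise_cons.mpr ⟨?_, ih hys⟩
      intro z hz
      rcases (PySem.List.mem_insertBy _ _ _ _).mp hz with rfl | hz
      · exact le_of_not_gt hb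
      · exact hy z hz

-- filtering commutes with one insertion into a sorted list
lemma filter_insertBy {α : Type} (key : α → Int) (q : α → Bool) (x : α) (ys : List α)
    (h : ys.Pairwise (fun a b => key a ≤ key b)) :
    (PySem.List.insertBy (fun a b => decide (key a < key b)) x ys).filter q =
      if q x then PySem.List.insertBy (fun a b => decide (key a < key b)) x (ys.filter q)
      else ys.filter q := by
  induction ys with
  | nil =>
    rw [insertBy_nil]
    by_cases hq : q x <;> simp [hq, insertBy_nil]
  | cons y ys ih =>
    rcases List.pairwise_cons.mp h with ⟨hy, hys⟩
    rw [insertBy_cons]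
    by_cases hb : key x < key y
    · rw [if_pos (decide_eq_true hb)]
      by_cases hq : q x
      · rw [List.filter_cons_of_pos hq, if_pos hq]
        rw [insertBy_all_before]
        intro z hz
        rcases List.mem_cons.mp (List.mem_of_mem_filter hz) with rfl | hz
        · exact hb
        · exact lt_of_lt_of_le hb (hy z hz)
      · rw [List.filter_cons_of_neg (by simpa using hq), if_neg hq]
    · rw [if_neg (by simp [hb])]
      by_cases hqy : q y
      · rw [List.filter_cons_of_pos hqy, List.filter_cons_of_pos hqy, ih hys]
        by_cases hq : q x
        · rw [if_pos hq, if_pos hq, insertBy_cons, if_neg (by simpa using hb)]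
        · rw [if_neg hq, if_neg hq]
      · rw [List.filter_cons_of_neg (by simpa using hqy), List.filter_cons_of_neg (by simpa using hqy), ih hys]

-- stable sort commutes with map (through corresponding keys), foldl form
lemma foldl_insertBy_map {α β : Type} (f : α → β) (keyb : α → Int) (keya : β → Int)
    (hk : ∀ t, keya (f t) = keyb t) (l acc : List α) :
    (l.foldl (fun acc x => PySem.List.insertBy (fun a b => decide (keyb a < keyb b)) x acc) acc).map f =
      (l.map f).foldl (fun acc x => PySem.List.insertBy (fun a b => decide (keya a < keya b)) x acc) (acc.map f) := by
  induction l generalizing acc with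
  | nil => rfl
  | cons x l ih =>
    rw [List.map_cons, List.foldl_cons, List.foldl_cons, ih, map_insertBy f keyb keya hk]

lemma sorted_map_comm {α β : Type} (f : α → β) (keyb : α → Int) (keya : β → Int)
    (hk : ∀ t, keya (f t) = keyb t) (l : List α) :
    (PySem.List.sorted l keyb false).map f = PySem.List.sorted (l.map f) keya false := by
  rw [PySem.List.sorted_eq_foldl_insertBy, PySem.List.sorted_eq_foldl_insertBy]
  exact foldl_insertBy_map f keyb keya hk l []

-- stable sort commutes with filter, foldl form
lemma foldl_insertBy_filter {α : Type} (key : α → Int) (q : α → Bool) (l acc : List α)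
    (h : acc.Pairwise (fun a b => key a ≤ key b)) :
    (l.foldl (fun acc x => PySem.List.insertBy (fun a b => decide (key a < key b)) x acc) acc).filter q =
      (l.filter q).foldl (fun acc x => PySem.List.insertBy (fun a b => decide (key a < key b)) x acc) (acc.filter q) := by
  induction l generalizing acc with
  | nil => rfl
  | cons x l ih =>
    rw [List.foldl_cons]
    by_cases hq : q x
    · rw [List.filter_cons_of_pos hq, List.foldl_cons, ih _ (pairwise_insertBy key x acc h),
        filter_insertBy key q x acc h, if_pos hq]
    · rw [List.filter_cons_of_neg (by simpa using hq), ih _ (pairwise_insertBy key x acc h),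
        filter_insertBy key q x acc h, if_neg hq]

lemma sorted_filter_comm {α : Type} (key : α → Int) (q : α → Bool) (l : List α) :
    (PySem.List.sorted l key false).filter q = PySem.List.sorted (l.filter q) key false := by
  rw [PySem.List.sorted_eq_foldl_insertBy, PySem.List.sorted_eq_foldl_insertBy]
  exact foldl_insertBy_filter key q l [] List.Pairwise.nil

-- a conditional-insert loop is the insert loop over the filtered list
lemma foldl_ite_filter {α β : Type} (p : α → Prop) [DecidablePred p] (f : β → α → β)
    (l : List α) (init : β) :
    l.foldl (fun acc x => if p x then f acc x else acc) init =
      (l.filter (fun x => decide (p x))).foldl f init := by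
  induction l generalizing init with
  | nil => rfl
  | cons x l ih =>
    rw [List.foldl_cons, List.filter_cons]
    by_cases hp : p x
    · rw [if_pos hp, if_pos (decide_eq_true hp), List.foldl_cons, ih]
    · rw [if_neg hp, if_neg (by simp [hp]), ih]

-- untagging a tagged copy is the identity
lemma map_untag (c : Int) (l : List (String × Int)) :
    l.map ((fun t : String × Int × Int => (t.1, t.2.1)) ∘ (fun p : String × Int => (p.1, p.2, c))) = l := by
  induction l with
  | nil => rfl
  | cons x l ih => rw [List.map_cons, ih]; rfl

-- the concrete instance of foldl_ite_filter used for B's scan loop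
lemma foldl_ite_insert (main : PySem.Dict String Int) (l : List (String × Int × Int))
    (d : PySem.Dict String Int) :
    l.foldl (fun d t => if t.2.1 > 10 ∧ (t.2.2 = 0 ∨ main.contains t.1 = false) then d.insert t.1 t.2.1 else d) d =
      (l.filter (fun t => decide (t.2.1 > 10 ∧ (t.2.2 = 0 ∨ main.contains t.1 = false)))).foldl
        (fun d t => d.insert t.1 t.2.1) d :=
  foldl_ite_filter _ _ _ _

-- A's set-union + get-fallback loop produces: main's items, then secondary's new items
lemma connected_eq_append (main secondary : PySem.Dict String Int)
    (hm : main.keys.Nodup) (hs : secondary.keys.Nodup) :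
    (PySem.Set.update (PySem.Set.update (PySem.Set.empty) (PySem.Dict.keys main)) (PySem.Dict.keys secondary)).foldl
      (fun acc key =>
        acc ++ [(key, match PySem.Dict.get? main key with
                      | some v => v
                      | none => (PySem.Dict.get? secondary key).getD 0)]) [] =
      main.items ++ secondary.items.filter (fun p => !(main.contains p.1)) := by
  have h1 : PySem.Set.update (PySem.Set.empty) (PySem.Dict.keys main) = main.keys := by
    rw [show (PySem.Set.empty : PySem.Set String) = [] from rfl, PySem.Set.update_nil_left, PySem.Set.ofList_eq_self_of_nodup _ hm]
  rw [h1, PySem.Set.update_eq_append_filter, PySem.Set.ofList_eq_self_of_nodup _ hs,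
    PySem.List.foldl_append_singleton_eq_map, List.nil_append, List.map_append]
  congr 1
  · rw [PySem.Dict.items_eq_map_keys main hm 0]
    apply List.map_congr_left
    intro k hk
    rcases hv : main.get? k with _ | v
    · exact absurd ((PySem.Dict.get?_eq_none_iff_not_mem_keys ..).mp hv) (by simpa using hk)
    · simp [hv, PySem.Dict.getD_eq_get?_getD]
  · have hpred : ∀ k ∈ secondary.keys,
        (!(PySem.Set.contains (PySem.Dict.keys main) k)) = (!(main.contains k)) := by
      intro k _
      congr 1
      by_cases hk : k ∈ main.keys
      · rw [(PySem.Set.contains_iff ..).mpr hk, (PySem.Dict.contains_iff_mem_keys ..).mpr hk]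
      · have h1 : PySem.Set.contains (PySem.Dict.keys main) k = false :=
          Bool.eq_false_iff.mpr (fun hc => hk ((PySem.Set.contains_iff ..).mp hc))
        have h2 : main.contains k = false :=
          Bool.eq_false_iff.mpr (fun hc => hk ((PySem.Dict.contains_iff_mem_keys ..).mp hc))
        rw [h1, h2]
    rw [List.filter_congr hpred, PySem.Dict.items_eq_map_keys secondary hs 0, List.filter_map]
    apply List.map_congr_left
    intro k hk
    have hnc : main.contains k = false := by
      have := List.of_mem_filter hk
      simpa using this
    have hnone : main.get? k = none := by
      rw [PySem.Dict.get?_eq_none_iff_not_mem_keys]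
      intro hmem
      rw [(PySem.Dict.contains_iff_mem_keys ..).mpr hmem] at hnc
      cases hnc
    simp [hnone, PySem.Dict.getD_eq_get?_getD]

-- the glue, stated for an arbitrary (main, secondary) pair of well-formed dicts
lemma glue (main secondary : PySem.Dict String Int)
    (hm : main.keys.Nodup) (hs : secondary.keys.Nodup) :
    (PySem.Dict.ofList (PySem.List.sorted
        (((PySem.Set.update (PySem.Set.update (PySem.Set.empty) (PySem.Dict.keys main)) (PySem.Dict.keys secondary)).foldl
          (fun acc key =>
            acc ++ [(key, match PySem.Dict.get? main key with
                          | some v => v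
                          | none => (PySem.Dict.get? secondary key).getD 0)]) []).filter (fun x => decide (x.2 > 10)))
        (fun x => x.2) false)).items =
    ((PySem.List.sorted
        (main.items.map (fun p => (p.1, p.2, (0 : Int))) ++ secondary.items.map (fun p => (p.1, p.2, (1 : Int))))
        (fun t => t.2.1) false).foldl
      (fun d t =>
        if t.2.1 > 10 ∧ (t.2.2 = 0 ∨ main.contains t.1 = false) then d.insert t.1 t.2.1 else d)
      (PySem.Dict.empty : PySem.Dict String Int)).items := by
  rw [connected_eq_append main secondary hm hs, foldl_ite_insert,
    sorted_filter_comm (fun t : String × Int × Int => t.2.1)]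
  set q : String × Int → Bool := fun x => decide (x.2 > 10) with hq
  set merged : List (String × Int) :=
    main.items ++ secondary.items.filter (fun p => !(main.contains p.1)) with hmg
  set S : List (String × Int) := PySem.List.sorted (merged.filter q) (fun x => x.2) false with hS
  set pBdec : String × Int × Int → Bool :=
    fun x => decide (x.2.1 > 10 ∧ (x.2.2 = 0 ∨ main.contains x.1 = false)) with hpB
  set cands : List (String × Int × Int) :=
    main.items.map (fun p => (p.1, p.2, (0 : Int))) ++ secondary.items.map (fun p => (p.1, p.2, (1 : Int))) with hcands
  -- key uniqueness of the merged list
  have hmk : (merged.map (fun p => p.1)).Nodup := by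
    rw [hmg, List.map_append, List.nodup_append]
    refine ⟨hm, hs.sublist ((List.filter_sublist).map _), ?_⟩
    intro x hx y hy
    rcases List.mem_map.mp hy with ⟨p, hp, rfl⟩
    rcases List.mem_filter.mp hp with ⟨_, hpf⟩
    intro hxy
    rw [hxy] at hx
    rw [(PySem.Dict.contains_iff_mem_keys ..).mpr hx] at hpf
    simp at hpf
  have hqk : ((merged.filter q).map (fun p => p.1)).Nodup :=
    hmk.sublist ((List.filter_sublist).map _)
  have hSperm : S.Perm (merged.filter q) := PySem.List.sorted_perm _ _ _
  have hndS : (S.map (fun p => p.1)).Nodup := ((hSperm.map _).nodup_iff).mpr hqk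
  -- A's side: the dict built from the sorted filtered list has exactly it as items
  have hAside : (PySem.Dict.ofList S).items = S := by
    have h := PySem.Dict.items_foldl_insert_fresh S (fun p => p.1) (fun p => p.2)
      (PySem.Dict.empty : PySem.Dict String Int) (fun a _ => by simp) hndS
    refine h.trans ?_
    rw [show (PySem.Dict.empty : PySem.Dict String Int).items = [] from rfl, List.nil_append]
    simp
  -- B's filtered candidate list, per source
  have hfilter : cands.filter pBdec
      = (main.items.filter q).map (fun p => (p.1, p.2, (0 : Int)))
        ++ ((secondary.items.filter (fun p => !(main.contains p.1))).filter q).map (fun p => (p.1, p.2, (1 : Int))) := by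
    rw [hcands, List.filter_append, List.filter_map, List.filter_map, List.filter_filter]
    congr 1
    · congr 1
      apply List.filter_congr
      intro p _
      by_cases hv : p.2 > 10 <;> simp [hv, hpB, hq]
    · congr 1
      apply List.filter_congr
      intro p _
      by_cases hc : main.contains p.1 <;> by_cases hv : p.2 > 10 <;> simp [hv, hc, hpB, hq]
  -- untagging B's filtered candidates gives A's filtered merged list
  have hmapf : (cands.filter pBdec).map (fun t : String × Int × Int => (t.1, t.2.1)) = merged.filter q := by
    rw [hfilter, List.map_append, List.map_map, List.map_map, hmg, List.filter_append]
    congr 1 <;> exact map_untag _ _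
  have hBmap : (PySem.List.sorted (cands.filter pBdec) (fun t => t.2.1) false).map
      (fun t : String × Int × Int => (t.1, t.2.1)) = S := by
    rw [sorted_map_comm (fun t : String × Int × Int => (t.1, t.2.1)) (fun t => t.2.1) (fun x => x.2)
      (fun t => rfl), hmapf, hS]
  have hndB : ((PySem.List.sorted (cands.filter pBdec) (fun t => t.2.1) false).map
      (fun t : String × Int × Int => t.1)).Nodup := by
    have hcomp : (fun t : String × Int × Int => t.1) =
        (fun p : String × Int => p.1) ∘ (fun t : String × Int × Int => (t.1, t.2.1)) := rfl
    rw [hcomp, ← List.map_map, hBmap]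
    exact hndS
  have hBside : ((PySem.List.sorted (cands.filter pBdec) (fun t => t.2.1) false).foldl
      (fun d t => d.insert t.1 t.2.1) (PySem.Dict.empty : PySem.Dict String Int)).items = S := by
    have h := PySem.Dict.items_foldl_insert_fresh
      (PySem.List.sorted (cands.filter pBdec) (fun t => t.2.1) false)
      (fun t : String × Int × Int => t.1) (fun t => t.2.1)
      (PySem.Dict.empty : PySem.Dict String Int) (fun a _ => by simp) hndB
    refine h.trans ?_
    rw [show (PySem.Dict.empty : PySem.Dict String Int).items = [] from rfl, List.nil_append]
    exact hBmap
  rw [hAside]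
  exact hBside.symm

-- ===== VERDICT (by name: the statement is the Claim_ definition above) =====
theorem connect_dicts_spec : Claim_equal_connect_dicts := by
  intro a b _
  unfold Spec_connect_dicts connect_dicts connect_dicts_alt
  by_cases h : (PySem.Dict.ofList a).values.sum > (PySem.Dict.ofList b).values.sum <;>
    simp only [h, if_pos, if_neg, not_false_iff] <;>
    exact glue _ _ (PySem.Dict.nodup_keys_ofList ..) (PySem.Dict.nodup_keys_ofList ..)
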